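-- pv_equiv track=rewrite | github.com/ChahelPaatur/Self-Modifying-Program-Synthesis-via-Online-Library-Evolution | Submission/kaggle_notebook_FULL.py | apply_gravity_up
-- ===== SOURCE A (Python) =====
-- from typing import List, Dict, Tuple, Optional, Set, Callable
--
-- Grid = List[List[int]]
--
-- def apply_gravity_up(g: Grid, bg: int = 0) -> Grid:
--     if not g:
--         return g
--     h, w = len(g), len(g[0])
--     result = [[bg] * w for _ in range(h)]
--     for c in range(w):
--         stack = [g[r][c] for r in range(h) if g[r][c] != bg]
--         for i, val in enumerate(stack):
--             result[i][c] = val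
--     return result
-- ===== SOURCE B (Python) =====
-- from typing import List
-- Grid = List[List[int]]
--
-- def apply_gravity_up(g: Grid, bg: int = 0) -> Grid:
--     # Gravity-up is a stable sort of each column by the boolean key "is background":
--     # non-background cells (key False) come first in their original order, background
--     # cells (key True) sink to the bottom.
--     if not g:
--         return g
--     h, w = len(g), len(g[0])
--     cols = [sorted((g[r][c] for r in range(h)), key=lambda v: v == bg) for c in range(w)]
--     return [[cols[c][r] for c in range(w)] for r in range(h)]
-- ===== Notes on version B (the rewrite author's own statement) =====
-- stated objective: alternative
-- what changed: B realises gravity as a stable sort: each column is stably sorted by the boolean key 'value == bg' (non-background first, original order preserved) and the sorted columns are transposed back into rows, instead of A's explicit collection of non-background values per column written positionally into a preallocated bg-filled grid.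
import Mathlib
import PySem

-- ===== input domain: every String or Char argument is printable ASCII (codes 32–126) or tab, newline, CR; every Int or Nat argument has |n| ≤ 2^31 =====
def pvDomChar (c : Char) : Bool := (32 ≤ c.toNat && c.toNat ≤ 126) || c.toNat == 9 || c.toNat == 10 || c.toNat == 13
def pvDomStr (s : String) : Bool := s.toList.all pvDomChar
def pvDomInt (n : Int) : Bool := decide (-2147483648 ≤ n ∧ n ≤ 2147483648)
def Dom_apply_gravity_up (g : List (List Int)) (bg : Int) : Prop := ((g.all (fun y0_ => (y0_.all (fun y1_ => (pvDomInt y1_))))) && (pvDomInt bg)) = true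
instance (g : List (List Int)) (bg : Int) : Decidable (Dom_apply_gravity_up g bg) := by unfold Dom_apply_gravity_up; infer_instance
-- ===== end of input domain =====

-- B realises gravity as a stable sort of each column by the boolean key "value == bg"
-- (non-background first, order preserved), then transposes back — a different algorithm, same result.

-- ===== PORT A =====
def apply_gravity_up (g : List (List Int)) (bg : Int) : List (List Int) :=
  if g = [] then g else
    let h := g.length
    let w := (g.headD []).length
    let init := (List.range h).map (fun _ => List.replicate w bg)
    (List.range w).foldl (fun res c =>
      let stack := (List.range h).foldl (fun s r =>
        if (g.getD r []).getD c bg ≠ bg then s ++ [(g.getD r []).getD c bg] else s)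
        ([] : List Int)
      (stack.zipIdx).foldl (fun res2 p =>
        res2.set p.2 ((res2.getD p.2 []).set c p.1)) res) init

-- ===== PORT B =====
def apply_gravity_up_alt (g : List (List Int)) (bg : Int) : List (List Int) :=
  if g = [] then g else
    let h := g.length
    let w := (g.headD []).length
    let cols := (List.range w).map (fun c =>
      PySem.List.sorted ((List.range h).map (fun r => (g.getD r []).getD c bg))
        (fun v => v == bg) false)
    (List.range h).map (fun r => (List.range w).map (fun c => (cols.getD c []).getD r bg))

-- ===== PRECONDITION & SPEC =====
-- Pre_ excludes ragged grids in which some row is shorter than the first row: there the Python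
-- (both A and B) raises IndexError on g[r][c].
def Pre_apply_gravity_up (g : List (List Int)) (bg : Int) : Prop :=
  ∀ row ∈ g, (g.headD []).length ≤ row.length
instance (g : List (List Int)) (bg : Int) : Decidable (Pre_apply_gravity_up g bg) := by
  unfold Pre_apply_gravity_up; infer_instance

def pvWitness_apply_gravity_up : List (List Int) × Int := ([[1, 0], [0, 2]], 0)

def Spec_apply_gravity_up (g : List (List Int)) (bg : Int) (out : List (List Int)) : Prop := out = apply_gravity_up_alt g bg
instance (g : List (List Int)) (bg : Int) (out : List (List Int)) : Decidable (Spec_apply_gravity_up g bg out) := by unfold Spec_apply_gravity_up; infer_instance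

-- ===== CLAIM (what is proved, stated in full; the proofs are below) =====
def Claim_equal_apply_gravity_up : Prop := ∀ (g : List (List Int)) (bg : Int), Dom_apply_gravity_up g bg → Pre_apply_gravity_up g bg → Spec_apply_gravity_up g bg (apply_gravity_up g bg)

-- ===== LEMMAS AND PROOFS =====

-- cell (r,c) of the grid, read the way both ports read it
def pvCell (g : List (List Int)) (bg : Int) (c r : Nat) : Int := (g.getD r []).getD c bg

-- the compacted column c
def pvStack (g : List (List Int)) (bg : Int) (c : Nat) : List Int :=
  ((List.range g.length).filter (fun r => decide (pvCell g bg c r ≠ bg))).map (pvCell g bg c)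

-- A's per-column write loop, as a function of the column, the stack and the start index
def pvWrite (c : Nat) (stack : List Int) (res : List (List Int)) (k : Nat) : List (List Int) :=
  (stack.zipIdx k).foldl (fun res2 p => res2.set p.2 ((res2.getD p.2 []).set c p.1)) res

-- A's whole per-column step
def pvF (g : List (List Int)) (bg : Int) (res : List (List Int)) (c : Nat) : List (List Int) :=
  pvWrite c (pvStack g bg c) res 0

lemma stack_eq (g : List (List Int)) (bg : Int) (c : Nat) :
    (List.range g.length).foldl (fun s r =>
        if (g.getD r []).getD c bg ≠ bg then s ++ [(g.getD r []).getD c bg] else s)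
      ([] : List Int) = pvStack g bg c := by
  have := PySem.List.foldl_append_if (fun r => decide (pvCell g bg c r ≠ bg))
    (pvCell g bg c) (List.range g.length) []
  simpa [pvStack, pvCell] using this

-- ===== B-side: the stable sort by the boolean key (· == bg) is the partition
-- "non-background (in order) ++ background (in order)" =====

lemma insertBy_part (bg x : Int) (A B : List Int)
    (hA : ∀ a ∈ A, (a == bg) = false) (hB : ∀ b ∈ B, (b == bg) = true) :
    PySem.List.insertBy (fun a b => decide ((a == bg) < (b == bg))) x (A ++ B) =
      if (x == bg) = false then A ++ x :: B else A ++ B ++ [x] := by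
  induction A with
  | nil =>
    induction B with
    | nil => simp [PySem.List.insertBy]
    | cons b B' ihB =>
      have hb : (b == bg) = true := hB b (by simp)
      by_cases hx : (x == bg) = false
      · simp [PySem.List.insertBy, hb, hx]
      · simp only [Bool.not_eq_false] at hx
        have h2 := ihB (fun b' hb' => hB b' (List.mem_cons_of_mem _ hb'))
        simp only [hx, Bool.true_eq_false, if_false, List.nil_append] at h2
        simp [PySem.List.insertBy, hb, hx, h2]
  | cons a A' ihA =>
    have ha : (a == bg) = false := hA a (by simp)
    have hlt : decide ((x == bg) < (a == bg)) = false := by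
      rw [ha]; cases hxbg : (x == bg) <;> simp
    simp only [List.cons_append, PySem.List.insertBy, hlt, Bool.false_eq_true, if_false]
    rw [ihA (fun a' ha' => hA a' (List.mem_cons_of_mem _ ha'))]
    by_cases hx : (x == bg) = false <;> simp [hx]

lemma foldl_insert_part (bg : Int) (xs : List Int) :
    ∀ (A B : List Int), (∀ a ∈ A, (a == bg) = false) → (∀ b ∈ B, (b == bg) = true) →
    xs.foldl (fun acc x => PySem.List.insertBy
        (fun a b => decide ((a == bg) < (b == bg))) x acc) (A ++ B) =
      (A ++ xs.filter (fun v => !(v == bg))) ++ (B ++ xs.filter (fun v => v == bg)) := by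
  induction xs with
  | nil => intro A B _ _; simp
  | cons x xs ih =>
    intro A B hA hB
    rw [List.foldl_cons, insertBy_part bg x A B hA hB]
    by_cases hx : (x == bg) = false
    · rw [if_pos hx]
      have hsplit : A ++ x :: B = (A ++ [x]) ++ B := by simp
      have hA' : ∀ a ∈ A ++ [x], (a == bg) = false := by
        intro a ha
        rcases List.mem_append.1 ha with h | h
        · exact hA a h
        · simp only [List.mem_singleton] at h; subst h; exact hx
      rw [hsplit, ih (A ++ [x]) B hA' hB]
      simp [List.filter_cons, hx]
    · simp only [Bool.not_eq_false] at hx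
      have hB' : ∀ b ∈ B ++ [x], (b == bg) = true := by
        intro b hb
        rcases List.mem_append.1 hb with h | h
        · exact hB b h
        · simp only [List.mem_singleton] at h; subst h; exact hx
      rw [if_neg (by simp [hx]), List.append_assoc, ih A (B ++ [x]) hA hB']
      simp [List.filter_cons, hx]

lemma sorted_part (bg : Int) (xs : List Int) :
    PySem.List.sorted xs (fun v => v == bg) false =
      xs.filter (fun v => !(v == bg)) ++ xs.filter (fun v => v == bg) := by
  rw [PySem.List.sorted_eq_foldl_insertBy]
  simpa using foldl_insert_part bg xs [] [] (by simp) (by simp)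

lemma filter_len_split {α : Type} (p : α → Bool) (l : List α) :
    (l.filter p).length + (l.filter (fun x => !p x)).length = l.length := by
  induction l with
  | nil => rfl
  | cons a t ih => cases h : p a <;> simp [List.filter_cons, h, ← ih] <;> omega

-- the sorted column is A's compacted stack padded with background
lemma col_sorted_eq (g : List (List Int)) (bg : Int) (c : Nat) :
    PySem.List.sorted ((List.range g.length).map (fun r => (g.getD r []).getD c bg))
        (fun v => v == bg) false =
      pvStack g bg c ++ List.replicate (g.length - (pvStack g bg c).length) bg := by
  rw [sorted_part]
  have hmap : ∀ q : Int → Bool,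
      ((List.range g.length).map (fun r => (g.getD r []).getD c bg)).filter q =
        ((List.range g.length).filter (fun r => q (pvCell g bg c r))).map (pvCell g bg c) := by
    intro q
    induction (List.range g.length) with
    | nil => rfl
    | cons a t ih =>
      simp only [List.map_cons, List.filter_cons, pvCell]
      split_ifs
      · rw [List.map_cons, ih]; rfl
      · exact ih
  have hF : ((List.range g.length).map (fun r => (g.getD r []).getD c bg)).filter
      (fun v => !(v == bg)) = pvStack g bg c := by
    rw [hmap]; unfold pvStack
    congr 1
    exact List.filter_congr (by intro r _; rw [decide_not]; rfl)
  rw [hF]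
  congr 1
  have hall : ∀ v ∈ ((List.range g.length).map (fun r => (g.getD r []).getD c bg)).filter
      (fun v => v == bg), v = bg := by
    intro v hv
    have := List.of_mem_filter hv
    simpa using this
  have hlen : (((List.range g.length).map (fun r => (g.getD r []).getD c bg)).filter
      (fun v => v == bg)).length = g.length - (pvStack g bg c).length := by
    have h1 := filter_len_split (fun v : Int => v == bg)
      ((List.range g.length).map (fun r => (g.getD r []).getD c bg))
    rw [hF] at h1
    simp only [List.length_map, List.length_range] at h1
    omega
  rw [List.eq_replicate_iff.mpr ⟨hlen, hall⟩]

-- ===== A-side invariants =====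

lemma pvStack_len (g : List (List Int)) (bg : Int) (c : Nat) :
    (pvStack g bg c).length ≤ g.length := by
  simp only [pvStack, List.length_map]
  exact le_trans (List.length_filter_le _ _) (by simp)

lemma getD_set_eq {α : Type} (l : List α) (k r : Nat) (x d : α) :
    (l.set k x).getD r d = if r = k ∧ k < l.length then x else l.getD r d := by
  simp [List.getD, List.getElem?_set]
  split_ifs <;> simp_all

lemma getD_irrel {α : Type} (l : List α) (r : Nat) (d d' : α) (h : r < l.length) :
    l.getD r d = l.getD r d' := by
  rw [List.getD_eq_getElem l d h, List.getD_eq_getElem l d' h]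

lemma pvWrite_length (c : Nat) (stack : List Int) (res : List (List Int)) (k : Nat) :
    (pvWrite c stack res k).length = res.length := by
  induction stack generalizing res k with
  | nil => simp [pvWrite]
  | cons v t ih => simp [pvWrite, List.zipIdx_cons] at ih ⊢; rw [ih]; simp

lemma pvWrite_rowlen (c : Nat) (stack : List Int) (res : List (List Int)) (k r : Nat) :
    ((pvWrite c stack res k).getD r []).length = (res.getD r []).length := by
  induction stack generalizing res k with
  | nil => simp [pvWrite]
  | cons v t ih =>
    simp only [pvWrite, List.zipIdx_cons, List.foldl_cons] at ih ⊢
    rw [ih, getD_set_eq]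
    split_ifs with hif
    · simp [hif.1]
    · rfl

lemma pvWrite_getD (c : Nat) (stack : List Int) (res : List (List Int)) (k r : Nat)
    (hk : k + stack.length ≤ res.length) :
    (pvWrite c stack res k).getD r [] =
      if k ≤ r ∧ r < k + stack.length then (res.getD r []).set c (stack.getD (r - k) 0)
      else res.getD r [] := by
  induction stack generalizing res k with
  | nil =>
    simp only [pvWrite, List.zipIdx_nil, List.foldl_nil, List.length_nil, Nat.add_zero]
    rw [if_neg (by omega)]
  | cons v t ih =>
    simp only [List.length_cons] at hk
    simp only [pvWrite, List.zipIdx_cons, List.foldl_cons, List.length_cons] at ih ⊢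
    rw [ih _ (k+1) (by rw [List.length_set]; omega)]
    have hkl : k < res.length := by omega
    simp only [getD_set_eq]
    split_ifs with hA hC hB hB hC hB hB <;> try omega
    · have : (v::t).getD (r-k) 0 = t.getD (r-(k+1)) 0 := by
        rw [show r-k = (r-(k+1))+1 by omega, List.getD_cons_succ]
      rw [this]
    · obtain ⟨rfl, -⟩ := hC
      simp
    · rfl

lemma pvFold_length (g : List (List Int)) (bg : Int) (cs : List Nat) (res : List (List Int)) :
    (cs.foldl (pvF g bg) res).length = res.length := by
  induction cs generalizing res with
  | nil => rfl
  | cons c cs ih => rw [List.foldl_cons, ih, pvF, pvWrite_length]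

lemma pvFold_rowlen (g : List (List Int)) (bg : Int) (cs : List Nat) (res : List (List Int))
    (r : Nat) : ((cs.foldl (pvF g bg) res).getD r []).length = (res.getD r []).length := by
  induction cs generalizing res with
  | nil => rfl
  | cons c cs ih => rw [List.foldl_cons, ih, pvF, pvWrite_rowlen]

-- the heart of the A-side proof: after A has processed the columns cs, entry (r,c) holds the
-- compacted-column value when c ∈ cs reaches row r, and the previous entry otherwise
lemma pvFold_entry (g : List (List Int)) (bg : Int) (w : Nat) (cs : List Nat) :
    ∀ res, res.length = g.length → (∀ r', r' < res.length → (res.getD r' []).length = w) →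
    (∀ c', c' ∈ cs → c' < w) → ∀ r c, r < g.length → c < w →
    ((cs.foldl (pvF g bg) res).getD r []).getD c bg =
      if c ∈ cs ∧ r < (pvStack g bg c).length then (pvStack g bg c).getD r bg
      else (res.getD r []).getD c bg := by
  induction cs with
  | nil => intro res _ _ _ r c _ _; simp
  | cons c' cs ih =>
    intro res hlen hrow hcs r c hr hc
    rw [List.foldl_cons]
    have hstack := pvStack_len g bg c'
    have hres' : (pvF g bg res c').length = g.length := by
      rw [pvF, pvWrite_length, hlen]
    have hrow' : ∀ r', r' < (pvF g bg res c').length → ((pvF g bg res c').getD r' []).length = w := by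
      intro r' h'
      rw [pvF, pvWrite_rowlen]
      exact hrow r' (by rw [hres', ← hlen] at h'; exact h')
    rw [ih (pvF g bg res c') hres' hrow' (fun c'' h'' => hcs c'' (List.mem_cons_of_mem _ h'')) r c hr hc]
    have hentry : ((pvF g bg res c').getD r []).getD c bg =
        if c = c' ∧ r < (pvStack g bg c').length then (pvStack g bg c').getD r bg
        else (res.getD r []).getD c bg := by
      rw [pvF, pvWrite_getD c' (pvStack g bg c') res 0 r (by omega)]
      simp only [Nat.zero_add, Nat.zero_le, true_and, Nat.sub_zero]
      by_cases hrs : r < (pvStack g bg c').length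
      · rw [if_pos hrs, getD_set_eq]
        have hrw : (res.getD r []).length = w := hrow r (by omega)
        by_cases hcc : c = c'
        · subst hcc
          rw [if_pos ⟨rfl, by omega⟩, if_pos ⟨rfl, hrs⟩]
          exact getD_irrel _ r 0 bg hrs
        · rw [if_neg (by tauto), if_neg (by tauto)]
      · rw [if_neg hrs, if_neg (by tauto)]
    rw [hentry]
    by_cases hcc : c = c'
    · subst hcc
      by_cases hrs : r < (pvStack g bg c).length
      · simp [hrs]
      · simp [hrs]
    · simp only [List.mem_cons]
      by_cases hmem : c ∈ cs
      · simp [hmem, hcc]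
      · simp [hmem, hcc]

-- ===== VERDICT (by name: the statement is the Claim_ definition above) =====
theorem apply_gravity_up_spec : Claim_equal_apply_gravity_up := by
  intro g bg _ _
  unfold Spec_apply_gravity_up
  by_cases hg : g = []
  · simp [apply_gravity_up, apply_gravity_up_alt, hg]
  · have hA : apply_gravity_up g bg =
        (List.range (g.headD []).length).foldl (pvF g bg)
          ((List.range g.length).map (fun _ => List.replicate (g.headD []).length bg)) := by
      simp only [apply_gravity_up, if_neg hg]
      congr 1
      funext res c
      rw [stack_eq]
      rfl
    have hB : apply_gravity_up_alt g bg =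
        (List.range g.length).map (fun r => (List.range (g.headD []).length).map (fun c =>
          ((((List.range (g.headD []).length).map (fun c' =>
            pvStack g bg c' ++ List.replicate (g.length - (pvStack g bg c').length) bg)).getD c []).getD r bg))) := by
      simp only [apply_gravity_up_alt, if_neg hg]
      congr 1
      funext r
      congr 1
      funext c
      congr 2
      refine List.map_congr_left fun c' _ => ?_
      rw [col_sorted_eq]
    rw [hA, hB]
    set h := g.length with hh
    set w := (g.headD []).length with hw
    set init := (List.range h).map (fun _ => List.replicate w bg) with hinit
    have hinitlen : init.length = h := by simp [hinit]
    have hinitrow : ∀ r', r' < init.length → (init.getD r' []).length = w := by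
      intro r' h'
      rw [hinitlen] at h'
      rw [hinit, List.getD_eq_getElem _ _ (by simpa using h')]
      simp
    apply List.ext_getElem
    · rw [pvFold_length]; simp [hinitlen]
    · intro r h1 h2
      have hr : r < h := by simpa using h2
      apply List.ext_getElem
      · rw [← List.getD_eq_getElem _ ([] : List Int) h1, pvFold_rowlen]
        rw [hinitrow r (by omega)]
        simp
      · intro c hc1 hc2
        have hc : c < w := by simpa using hc2
        have hL : (((List.range w).foldl (pvF g bg) init)[r]'h1)[c]'hc1 =
            (((List.range w).foldl (pvF g bg) init).getD r []).getD c bg := by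
          rw [List.getD_eq_getElem _ ([] : List Int) h1]
          rw [List.getD_eq_getElem _ bg hc1]
        rw [hL]
        rw [pvFold_entry g bg w (List.range w) init hinitlen hinitrow (by simp) r c hr hc]
        have hreplgetD : (init.getD r []).getD c bg = bg := by
          have hrow : init.getD r [] = List.replicate w bg := by
            rw [hinit, List.getD_eq_getElem _ _ (by simpa using hr)]
            simp
          rw [hrow, List.getD_eq_getElem _ bg (by simpa using hc)]
          simp
        rw [hreplgetD]
        simp only [List.getElem_map, List.getElem_range]
        rw [List.getD_eq_getElem ((List.range w).map (fun c' =>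
              pvStack g bg c' ++ List.replicate (h - (pvStack g bg c').length) bg))
            ([] : List Int) (by simpa using hc)]
        simp only [List.getElem_map, List.getElem_range]
        have hlen : (pvStack g bg c).length ≤ h := pvStack_len g bg c
        by_cases hrs : r < (pvStack g bg c).length
        · rw [if_pos ⟨by simpa using hc, hrs⟩]
          rw [List.getD_append _ _ _ _ hrs]
        · rw [if_neg (by tauto)]
          rw [List.getD_append_right _ _ _ _ (by omega)]
          rw [List.getD_eq_getElem _ bg (by simp; omega)]
          simp
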